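-- pv_equiv track=rewrite | github.com/OpenLLM-France/lucie-rl | gsm8k_rewards.py | extract_calculations
-- ===== SOURCE A (Python) =====
-- def extract_calculations(s: str) -> str:
--     lst = []
--     i = 0
--     while i < len(s):
--         if i+1 < len(s) and '<' == s[i] and '<' == s[i+1]:
--             t = ''
--             i += 2
--             while i < len(s) and s[i] not in [ '>' ]:
--                 if s[i] not in [ ' ', '\t', '\n' ]:
--                     t += s[i]
--                 i += 1
--             lst.append(t)
--             continue
--         i += 1
--
--     return sorted(lst)
-- ===== SOURCE B (Python) =====
-- import re
--
--
-- def extract_calculations(s: str) -> str: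
--     # Regex scan: capture each '<<'-run up to the next '>' (or end of string),
--     # then drop space/tab/newline from each capture.
--     return sorted(re.sub(r'[ \t\n]', '', m) for m in re.findall(r'<<([^>]*)', s))
-- ===== Notes on version B (the rewrite author's own statement) =====
-- stated objective: idiomatic
-- what changed: Replaces the hand-rolled index-based two-level while-loop scanner with a regex pipeline: re.findall captures every run after a double angle bracket up to the next closing bracket or end of string, and re.sub strips exactly space, tab and newline from each capture before sorting.
import Mathlib
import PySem

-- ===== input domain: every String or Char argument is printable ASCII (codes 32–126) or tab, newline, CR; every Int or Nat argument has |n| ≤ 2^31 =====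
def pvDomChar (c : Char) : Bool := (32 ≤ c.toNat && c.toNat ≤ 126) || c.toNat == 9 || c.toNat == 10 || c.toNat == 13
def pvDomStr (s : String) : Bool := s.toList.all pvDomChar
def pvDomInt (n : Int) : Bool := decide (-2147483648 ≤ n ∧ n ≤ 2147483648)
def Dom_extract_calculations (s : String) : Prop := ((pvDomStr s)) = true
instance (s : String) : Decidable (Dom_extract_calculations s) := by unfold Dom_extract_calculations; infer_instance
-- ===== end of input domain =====

-- B replaces A's manual index-based two-level while-loop scanner with a regex findall
-- (r'<<([^>]*)') plus a whitespace-removing substitution; objective: idiomatic.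

-- ===== PORT A =====
-- inner while-loop of A: consume chars until '>' (or end), building t (whitespace skipped);
-- returns (t, remaining suffix starting at the '>' if any)
def pvInnerA : List Char → List Char × List Char
  | [] => ([], [])
  | c :: rest =>
    if c = '>' then ([], c :: rest)
    else
      let (t, rem) := pvInnerA rest
      ((if ¬ (c = ' ' ∨ c = '\t' ∨ c = '\n') then c :: t else t), rem)

theorem pvInnerA_rem_le (l : List Char) : (pvInnerA l).2.length ≤ l.length := by
  induction l with
  | nil => simp [pvInnerA]
  | cons c rest ih =>
    simp only [pvInnerA]
    split
    · simp
    · simpa using Nat.le_succ_of_le ih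

-- outer while-loop of A over the remaining suffix, with the accumulator lst
def pvLoopA : List Char → List String → List String
  | [], lst => lst
  | [_], lst => lst
  | c1 :: c2 :: rest, lst =>
    if c1 = '<' ∧ c2 = '<' then
      let p := pvInnerA rest
      pvLoopA p.2 (lst ++ [String.mk p.1])
    else
      pvLoopA (c2 :: rest) lst
termination_by l _ => l.length
decreasing_by
  · simpa using Nat.lt_succ_of_le (Nat.le_succ_of_le (pvInnerA_rem_le rest))
  · simp

def extract_calculations (s : String) : List String :=
  PySem.List.sorted (pvLoopA s.toList []) (fun x => x) false

-- ===== PORT B =====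
-- re.sub(r'[ \t\n]', '', m) as a char filter
def pvKeep (c : Char) : Bool := c ≠ ' ' && c ≠ '\t' && c ≠ '\n'

-- re.findall(r'<<([^>]*)', s): each match captures the longest '>'-free run after a '<<'
def pvFindall : List Char → List (List Char)
  | [] => []
  | [_] => []
  | c1 :: c2 :: rest =>
    if c1 = '<' && c2 = '<' then
      rest.takeWhile (· ≠ '>') :: pvFindall (rest.dropWhile (· ≠ '>'))
    else
      pvFindall (c2 :: rest)
termination_by l => l.length
decreasing_by
  · simpa using Nat.lt_succ_of_le (Nat.le_succ_of_le (List.length_dropWhile_le _ _))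
  · simp

def extract_calculations_alt (s : String) : List String :=
  PySem.List.sorted ((pvFindall s.toList).map (fun m => String.mk (m.filter pvKeep)))
    (fun x => x) false

-- ===== PRECONDITION & SPEC =====
def Spec_extract_calculations (s : String) (out : List String) : Prop := out = extract_calculations_alt s
instance (s : String) (out : List String) : Decidable (Spec_extract_calculations s out) := by unfold Spec_extract_calculations; infer_instance

-- ===== CLAIM (what is proved, stated in full; the proofs are below) =====
def Claim_equal_extract_calculations : Prop := ∀ (s : String), Dom_extract_calculations s → Spec_extract_calculations s (extract_calculations s)

-- ===== LEMMAS AND PROOFS =====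
theorem pvInnerA_eq (l : List Char) :
    pvInnerA l = ((l.takeWhile (· ≠ '>')).filter pvKeep, l.dropWhile (· ≠ '>')) := by
  induction l with
  | nil => simp [pvInnerA]
  | cons c rest ih =>
    by_cases h : c = '>'
    · simp [pvInnerA, h]
    · by_cases hw : c = ' ' ∨ c = '\t' ∨ c = '\n'
      · have : pvKeep c = false := by
          rcases hw with h1 | h1 | h1 <;> simp [pvKeep, h1]
        simp [pvInnerA, h, ih, hw, this]
      · have : pvKeep c = true := by
          simp only [pvKeep, Bool.and_eq_true, ne_eq, decide_not, Bool.not_eq_true',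
            decide_eq_false_iff_not]
          tauto
        simp [pvInnerA, h, ih, hw, this]

theorem pvLoopA_eq (l : List Char) (lst : List String) :
    pvLoopA l lst = lst ++ (pvFindall l).map (fun m => String.mk (m.filter pvKeep)) := by
  induction hn : l.length using Nat.strong_induction_on generalizing l lst with
  | _ n ih =>
    match l with
    | [] => simp [pvLoopA, pvFindall]
    | [c] => simp [pvLoopA, pvFindall]
    | c1 :: c2 :: rest =>
      by_cases h : c1 = '<' ∧ c2 = '<'
      · have hd : (rest.dropWhile (· ≠ '>')).length < n := by
          subst hn
          simpa using Nat.lt_succ_of_le (Nat.le_succ_of_le (List.length_dropWhile_le _ _))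
        rw [pvLoopA, pvFindall]
        simp only [h, if_pos, pvInnerA_eq, decide_true, Bool.and_self]
        rw [ih _ hd _ _ rfl]
        simp
      · have hlt : (c2 :: rest).length < n := by subst hn; simp
        rw [pvLoopA, pvFindall]
        have hb : (c1 = '<' && c2 = '<') = false := by
          rcases not_and_or.mp h with h1 | h1 <;> simp [h1]
        simp only [h, if_false, hb, Bool.false_eq_true]
        exact ih _ hlt _ _ rfl

-- ===== VERDICT (by name: the statement is the Claim_ definition above) =====
theorem extract_calculations_spec : Claim_equal_extract_calculations := by
  intro s _
  unfold Spec_extract_calculations extract_calculations extract_calculations_alt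
  rw [pvLoopA_eq]
  simp
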